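-- pv_equiv track=rewrite | github.com/davecthomas/agentmemory | scripts/shared-repo-memory/common.py | render_sections
-- ===== SOURCE A (Python) =====
-- from collections import OrderedDict
--
-- def render_sections(sections: OrderedDict[str, list[str]]) -> str:
--     """Render an ordered section mapping back to Markdown body text.
--
--     Each section is written as an H2 heading followed by its bullet lines, or a
--     "- None" placeholder when the list is empty.
--
--     Args:
--         sections: Ordered mapping from section heading to bullet lines.
--
--     Returns:
--         str: Markdown body text ending with a single trailing newline.
--     """
--     lines: list[str] = []
--     for title, entries in sections.items():
--         lines.append(f"## {title}")
--         lines.append("")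
--         if entries:
--             lines.extend(entries)
--         else:
--             lines.append("- None")
--         lines.append("")
--     return "\n".join(lines).rstrip() + "\n"
-- ===== SOURCE B (Python) =====
-- def render_sections(sections):
--     """Render an ordered section mapping back to Markdown body text.
--
--     Builds the text back-to-front over the reversed section order: each block
--     carries its own trailing blank line, and only the last block (the first one
--     processed) is stripped of trailing whitespace, so no global rstrip pass or
--     intermediate line list is needed.
--     """
--     tail = ""
--     for title, entries in reversed(list(sections.items())):
--         body = "\n".join(entries) if entries else "- None"
--         block = f"## {title}\n\n{body}\n\n"
--         tail = block.rstrip() if not tail else block + tail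
--     return tail + "\n"
-- ===== Notes on version B (the rewrite author's own statement) =====
-- stated objective: alternative
-- what changed: B traverses the sections in reverse, building the output string back-to-front with each block carrying its own separators and trailing whitespace stripped locally from the final block only, instead of A's forward accumulation of a flat line list with sentinel blanks cleaned by a global join-then-rstrip pass.
import Mathlib
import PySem

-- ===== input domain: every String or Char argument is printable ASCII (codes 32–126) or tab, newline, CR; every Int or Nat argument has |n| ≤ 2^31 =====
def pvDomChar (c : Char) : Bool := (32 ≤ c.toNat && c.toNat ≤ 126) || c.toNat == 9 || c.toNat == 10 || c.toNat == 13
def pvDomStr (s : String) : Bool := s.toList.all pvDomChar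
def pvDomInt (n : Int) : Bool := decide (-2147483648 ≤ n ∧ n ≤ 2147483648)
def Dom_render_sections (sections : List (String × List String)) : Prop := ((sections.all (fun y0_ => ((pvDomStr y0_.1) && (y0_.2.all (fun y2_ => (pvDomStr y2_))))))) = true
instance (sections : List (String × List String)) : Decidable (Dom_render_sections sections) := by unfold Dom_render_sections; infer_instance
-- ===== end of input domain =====

-- B renders back-to-front over the reversed section order, stripping trailing whitespace
-- locally from the final block only, instead of A's flat line list + global join/rstrip; objective: alternative.


-- ===== PORT A =====
def render_sections (sections : List (String × List String)) : String :=
  let lines : List String := sections.foldl (fun lines p =>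
    (((lines ++ ["## " ++ p.1]) ++ [""]) ++
      (if p.2 ≠ [] then p.2 else ["- None"])) ++ [""]) []
  PySem.Str.rstrip (PySem.Str.join "\n" lines) ++ "\n"

-- ===== PORT B =====
def render_sections_alt (sections : List (String × List String)) : String :=
  let tail : String := sections.reverse.foldl (fun tail p =>
    let body := if p.2 ≠ [] then PySem.Str.join "\n" p.2 else "- None"
    let block := "## " ++ p.1 ++ "\n\n" ++ body ++ "\n\n"
    if tail = "" then PySem.Str.rstrip block else block ++ tail) ""
  tail ++ "\n"

-- ===== PRECONDITION & SPEC =====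
def Spec_render_sections (sections : List (String × List String)) (out : String) : Prop := out = render_sections_alt sections
instance (sections : List (String × List String)) (out : String) : Decidable (Spec_render_sections sections out) := by unfold Spec_render_sections; infer_instance

-- ===== CLAIM =====
def Claim_equal_render_sections : Prop := ∀ (sections : List (String × List String)), Dom_render_sections sections → Spec_render_sections sections (render_sections sections)

-- ===== LEMMAS AND PROOFS =====

-- the per-section group of lines A appends (as char lists)
def lineOfC (p : String × List String) : List (List Char) :=
  [("## " ++ p.1).toList, []] ++
    (if p.2 ≠ [] then p.2.map String.toList else [("- None" : String).toList]) ++ [[]]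

-- the self-contained per-section block B appends (as a char list), trailing blank line included
def blockFullC (p : String × List String) : List Char :=
  ("## " ++ p.1).toList ++ ['\n', '\n'] ++
    (if p.2 ≠ [] then PySem.Chars.join ['\n'] (p.2.map String.toList) else ("- None" : String).toList)
    ++ ['\n', '\n']

theorem linesA_eq (l : List (String × List String)) (acc : List String) :
    l.foldl (fun lines p =>
      (((lines ++ ["## " ++ p.1]) ++ [""]) ++
        (if p.2 ≠ [] then p.2 else ["- None"])) ++ [""]) acc
    = acc ++ l.flatMap (fun p => ["## " ++ p.1, ""] ++
        (if p.2 ≠ [] then p.2 else ["- None"]) ++ [""]) := by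
  induction l generalizing acc with
  | nil => simp
  | cons p t ih => simp only [List.foldl_cons, ih]; simp [List.flatMap_def]

theorem map_toList_lines (l : List (String × List String)) :
    (l.flatMap (fun p => ["## " ++ p.1, ""] ++
        (if p.2 ≠ [] then p.2 else ["- None"]) ++ [""])).map String.toList
      = l.flatMap lineOfC := by
  rw [List.map_flatMap]
  apply List.flatMap_congr
  intro p _
  unfold lineOfC
  by_cases h : p.2 = [] <;> simp [h]

theorem join_append (sep : List Char) (xs ys : List (List Char)) (hx : xs ≠ []) (hy : ys ≠ []) :
    PySem.Chars.join sep (xs ++ ys) = PySem.Chars.join sep xs ++ sep ++ PySem.Chars.join sep ys := by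
  induction xs with
  | nil => exact absurd rfl hx
  | cons a t ih =>
    cases t with
    | nil =>
      cases ys with
      | nil => exact absurd rfl hy
      | cons y ys' => simp [PySem.Chars.join_cons_cons, PySem.Chars.join_singleton]
    | cons b t' =>
      rw [List.cons_append, List.cons_append, PySem.Chars.join_cons_cons,
        ← List.cons_append, ih (by simp), PySem.Chars.join_cons_cons]
      simp

theorem lineOfC_ne_nil (p : String × List String) : lineOfC p ≠ [] := by
  simp [lineOfC]

theorem flatMap_lineOfC_ne_nil (l : List (String × List String)) (h : l ≠ []) :
    l.flatMap lineOfC ≠ [] := by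
  cases l with
  | nil => exact absurd rfl h
  | cons p t =>
    simp only [List.flatMap_cons]
    intro hc
    exact lineOfC_ne_nil p (List.append_eq_nil_iff.mp hc).1

-- joining one section's lines gives its full block minus the final newline
theorem join_lineOfC (p : String × List String) :
    PySem.Chars.join ['\n'] (lineOfC p) ++ ['\n'] = blockFullC p := by
  unfold lineOfC blockFullC
  by_cases h : p.2 = []
  · rw [if_neg (by simp [h]), if_neg (by simp [h])]
    rw [show ([("## " ++ p.1).toList, ([] : List Char)] ++ [("- None" : String).toList] ++ [[]])
        = ("## " ++ p.1).toList :: ([] : List Char) :: ("- None" : String).toList :: [([] : List Char)] by simp,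
      PySem.Chars.join_cons_cons, PySem.Chars.join_cons_cons, PySem.Chars.join_cons_cons,
      PySem.Chars.join_singleton]
    simp
  · have hb : p.2.map String.toList ≠ [] := by simpa using h
    obtain ⟨b, bs, hbs⟩ := List.exists_cons_of_ne_nil hb
    rw [if_pos h, if_pos h]
    rw [show ([("## " ++ p.1).toList, ([] : List Char)] ++ p.2.map String.toList ++ [[]])
        = ("## " ++ p.1).toList :: ([] : List Char) :: (p.2.map String.toList ++ [[]]) by simp]
    have h1 : p.2.map String.toList ++ [[]] = b :: (bs ++ [[]]) := by rw [hbs]; simp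
    rw [h1, PySem.Chars.join_cons_cons, PySem.Chars.join_cons_cons]
    rw [show b :: (bs ++ [[]]) = (b :: bs) ++ [[]] by simp, join_append ['\n'] (b :: bs) [[]] (by simp) (by simp)]
    simp [PySem.Chars.join_singleton, hbs]

-- A's joined line list, plus one final newline, is exactly the concatenation of the full blocks
theorem chainA (l : List (String × List String)) (h : l ≠ []) :
    PySem.Chars.join ['\n'] (l.flatMap lineOfC) ++ ['\n'] = (l.map blockFullC).flatten := by
  induction l with
  | nil => exact absurd rfl h
  | cons p t ih =>
    cases t with
    | nil => simp [join_lineOfC]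
    | cons q t' =>
      rw [List.flatMap_cons, join_append ['\n'] _ _ (lineOfC_ne_nil p) (flatMap_lineOfC_ne_nil _ (by simp)),
        List.map_cons, List.flatten_cons, ← ih (by simp), ← join_lineOfC]
      simp

theorem rstrip_newline (s : List Char) :
    PySem.Chars.rstrip (s ++ ['\n']) = PySem.Chars.rstrip s := by
  simp [PySem.Chars.rstrip, show PySem.Chars.isspace '\n' = true from by decide]

theorem rstrip_append (x y : List Char) (h : PySem.Chars.rstrip y ≠ []) :
    PySem.Chars.rstrip (x ++ y) = x ++ PySem.Chars.rstrip y := by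
  simp only [PySem.Chars.rstrip] at *
  rw [List.reverse_append, List.dropWhile_append]
  have : (y.reverse.dropWhile PySem.Chars.isspace).isEmpty = false := by
    cases hy : y.reverse.dropWhile PySem.Chars.isspace with
    | nil => exact absurd (by simp [hy]) h
    | cons a t => simp
  rw [if_neg (by simp [this])]
  simp

theorem rstrip_blockFullC_ne_nil (p : String × List String) :
    PySem.Chars.rstrip (blockFullC p) ≠ [] := by
  intro hc
  simp only [PySem.Chars.rstrip, List.reverse_eq_nil_iff, List.dropWhile_eq_nil_iff] at hc
  have hm : '#' ∈ (blockFullC p).reverse := by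
    simp [blockFullC]
  exact absurd (hc '#' hm) (by decide)

-- B's reverse fold computes the rstrip of the block concatenation (chars level)
theorem foldC (l : List (List Char)) (hne : l ≠ [])
    (h : ∀ b ∈ l, PySem.Chars.rstrip b ≠ []) :
    l.reverse.foldl (fun tail b => if tail = [] then PySem.Chars.rstrip b else b ++ tail) []
      = PySem.Chars.rstrip l.flatten ∧ PySem.Chars.rstrip l.flatten ≠ [] := by
  induction l with
  | nil => exact absurd rfl hne
  | cons b t ih =>
    rw [List.reverse_cons, List.foldl_append]
    cases t with
    | nil => simpa using h b (by simp)
    | cons c t' =>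
      obtain ⟨ih1, ih2⟩ := ih (by simp) (fun x hx => h x (by simp [hx]))
      rw [ih1]
      simp only [List.foldl_cons, List.foldl_nil, if_neg ih2]
      constructor
      · rw [show ((b :: c :: t') : List (List Char)).flatten = b ++ (c :: t').flatten from rfl,
          rstrip_append _ _ ih2]
      · rw [List.flatten_cons, rstrip_append _ _ ih2]
        intro hc
        exact ih2 (List.append_eq_nil_iff.mp hc).2

-- bridge: B's string-level fold to the chars-level fold over the block char lists
theorem foldB_toList (l : List (String × List String)) (acc : String) :
    (l.foldl (fun tail p =>
      let body := if p.2 ≠ [] then PySem.Str.join "\n" p.2 else "- None"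
      let block := "## " ++ p.1 ++ "\n\n" ++ body ++ "\n\n"
      if tail = "" then PySem.Str.rstrip block else block ++ tail) acc).toList
    = (l.map blockFullC).foldl
        (fun tail b => if tail = [] then PySem.Chars.rstrip b else b ++ tail) acc.toList := by
  induction l generalizing acc with
  | nil => simp
  | cons p t ih =>
    simp only [List.foldl_cons, List.map_cons]
    rw [ih]
    congr 1
    by_cases h : acc = ""
    · by_cases h2 : p.2 = [] <;>
        simp [h, h2, blockFullC, PySem.Str.toList_rstrip, PySem.Str.toList_join]
    · have h3 : acc.toList ≠ [] := fun hc =>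
        h (by rwa [show ([] : List Char) = "".toList from rfl, String.toList_inj] at hc)
      by_cases h2 : p.2 = [] <;>
        simp [h, h2, h3, blockFullC, PySem.Str.toList_join]

-- ===== VERDICT (by name: the statement is the Claim_ definition above) =====
theorem render_sections_spec : Claim_equal_render_sections := by
  intro l _
  unfold Spec_render_sections render_sections render_sections_alt
  rw [← String.toList_inj]
  simp only [linesA_eq, List.nil_append, String.toList_append,
    PySem.Str.toList_rstrip, PySem.Str.toList_join, foldB_toList]
  rw [map_toList_lines]
  have hnl : ("\n" : String).toList = ['\n'] := rfl
  rw [hnl, List.map_reverse, show ("".toList) = ([] : List Char) from rfl]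
  cases l with
  | nil => simp [PySem.Chars.rstrip]
  | cons p t =>
    have hb : ∀ b ∈ ((p :: t).map blockFullC), PySem.Chars.rstrip b ≠ [] := by
      intro b hbm
      obtain ⟨q, _, rfl⟩ := List.mem_map.mp hbm
      exact rstrip_blockFullC_ne_nil q
    obtain ⟨hf, _⟩ := foldC ((p :: t).map blockFullC) (by simp) hb
    rw [hf, ← chainA (p :: t) (by simp), rstrip_newline]
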